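-- pv_equiv track=rewrite | github.com/dannymcy/habitat-lab | habitat-lab/habitat/gpt/prompts/utils.py | extract_intention_approval
-- ===== SOURCE A (Python) =====
-- def extract_intention_approval(text):
--     """
--     Extract the 'yes/no' responses for intentions and reasons for intentions from the given text.
--     """
--     lines = text.split('\n')
--     intentions = []
--     reasons_intention = []
--     is_reason_section_intention = False
--
--     for line in lines:
--         line = line.strip()
--         if line.startswith("Intentions:"):
--             intentions = line.replace("Intentions:", "").strip().strip("[]").split(", ")
--         elif line.startswith("Reasons_intentions:"):
--             is_reason_section_intention = True  # Start extracting reasons for intentions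
--         elif is_reason_section_intention and line:
--             reasons_intention.append(line.strip())
--
--     return intentions, reasons_intention
-- ===== SOURCE B (Python) =====
-- def extract_intention_approval(text):
--     """
--     Extract the 'yes/no' responses for intentions and reasons for intentions from the given text.
--     """
--     lines = [ln.strip() for ln in text.split('\n')]
--     intentions = next(
--         (ln.replace("Intentions:", "").strip().strip("[]").split(", ")
--          for ln in reversed(lines) if ln.startswith("Intentions:")),
--         [])
--     idx = next((i for i, ln in enumerate(lines)
--                 if ln.startswith("Reasons_intentions:")), None)
--     reasons_intention = [] if idx is None else [
--         ln for ln in lines[idx + 1:]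
--         if ln and not ln.startswith("Intentions:")
--            and not ln.startswith("Reasons_intentions:")]
--     return intentions, reasons_intention
-- ===== Notes on version B (the rewrite author's own statement) =====
-- stated objective: alternative
-- what changed: Replaces A's flag-threaded single pass with a locate-then-slice decomposition: strip all lines once, take the last intentions-header line via a reverse search, and filter the reasons from the slice after the first reasons-header line.
import Mathlib
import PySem

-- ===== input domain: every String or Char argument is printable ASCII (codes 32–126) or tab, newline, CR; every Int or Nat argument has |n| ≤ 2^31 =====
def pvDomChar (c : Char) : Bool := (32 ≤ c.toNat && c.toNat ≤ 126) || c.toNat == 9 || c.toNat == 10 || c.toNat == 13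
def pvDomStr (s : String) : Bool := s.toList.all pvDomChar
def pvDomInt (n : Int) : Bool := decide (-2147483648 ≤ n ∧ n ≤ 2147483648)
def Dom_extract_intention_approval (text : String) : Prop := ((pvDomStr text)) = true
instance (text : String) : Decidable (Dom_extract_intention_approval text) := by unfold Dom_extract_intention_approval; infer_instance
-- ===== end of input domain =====

-- B replaces A's flag-threaded single pass by a locate-then-slice decomposition
-- (the last "Intentions:" line found by a reverse search; reasons filtered from
-- the slice after the first "Reasons_intentions:" line); objective: alternative.

-- ===== PORT A =====
def extract_intention_approval (text : String) : List String × List String :=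
  let lines := (PySem.Str.split? text "\n").getD []
  let st := lines.foldl
    (fun (st : List String × List String × Bool) line =>
      let line := PySem.Str.strip line
      if PySem.Str.startswith line "Intentions:" then
        ((PySem.Str.split?
          (PySem.Str.stripChars (PySem.Str.strip (PySem.Str.replace line "Intentions:" "")) "[]")
          ", ").getD [], st.2.1, st.2.2)
      else if PySem.Str.startswith line "Reasons_intentions:" then
        (st.1, st.2.1, true)
      else if st.2.2 && line != "" then
        (st.1, st.2.1 ++ [PySem.Str.strip line], st.2.2)
      else st)
    ([], [], false)
  (st.1, st.2.1)

-- ===== PORT B =====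
-- B-side helper: ln.startswith("Intentions:")
def eiaIsIntentions (ln : String) : Bool := PySem.Str.startswith ln "Intentions:"
-- B-side helper: ln.startswith("Reasons_intentions:")
def eiaIsReasons (ln : String) : Bool := PySem.Str.startswith ln "Reasons_intentions:"

-- B-side helper: parse one "Intentions:" line
def eiaIntentionsOf (line : String) : List String :=
  (PySem.Str.split?
    (PySem.Str.stripChars (PySem.Str.strip (PySem.Str.replace line "Intentions:" "")) "[]")
    ", ").getD []

-- B-side helper: a stripped line that belongs in the reasons list
def eiaKeep (ln : String) : Bool :=
  ln != "" && !eiaIsIntentions ln && !eiaIsReasons ln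

def extract_intention_approval_alt (text : String) : List String × List String :=
  let lines := ((PySem.Str.split? text "\n").getD []).map PySem.Str.strip
  let intentions :=
    match lines.reverse.find? eiaIsIntentions with
    | some ln => eiaIntentionsOf ln
    | none => []
  let reasons :=
    match lines.findIdx? eiaIsReasons with
    | some i => (lines.drop (i + 1)).filter eiaKeep
    | none => []
  (intentions, reasons)

-- ===== PRECONDITION & SPEC =====
def Spec_extract_intention_approval (text : String) (out : List String × List String) : Prop := out = extract_intention_approval_alt text
instance (text : String) (out : List String × List String) : Decidable (Spec_extract_intention_approval text out) := by unfold Spec_extract_intention_approval; infer_instance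

-- ===== CLAIM (what is proved, stated in full; the proofs are below) =====
def Claim_equal_extract_intention_approval : Prop := ∀ (text : String), Dom_extract_intention_approval text → Spec_extract_intention_approval text (extract_intention_approval text)

-- ===== LEMMAS AND PROOFS =====

-- A's loop body, named for the proofs (definitionally the lambda in the port of A)
def eiaStep (st : List String × List String × Bool) (line : String) :
    List String × List String × Bool :=
  let line := PySem.Str.strip line
  if PySem.Str.startswith line "Intentions:" then
    ((PySem.Str.split?
      (PySem.Str.stripChars (PySem.Str.strip (PySem.Str.replace line "Intentions:" "")) "[]")
      ", ").getD [], st.2.1, st.2.2)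
  else if PySem.Str.startswith line "Reasons_intentions:" then
    (st.1, st.2.1, true)
  else if st.2.2 && line != "" then
    (st.1, st.2.1 ++ [PySem.Str.strip line], st.2.2)
  else st

theorem dropWhile_reverse_dropWhile_reverse_of_head (p : Char → Bool) (t : List Char)
    (hh : t.dropWhile p = t) :
    ((t.reverse.dropWhile p).reverse).dropWhile p = (t.reverse.dropWhile p).reverse := by
  have hsuf : t.reverse.dropWhile p <:+ t.reverse := List.dropWhile_suffix p
  have hpre : (t.reverse.dropWhile p).reverse <+: t := by
    have := hsuf.reverse; simpa using this
  rcases hr : (t.reverse.dropWhile p).reverse with _ | ⟨a, u⟩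
  · simp
  · rw [hr] at hpre
    obtain ⟨w, hw⟩ := hpre
    have hpa : p a = false := by
      by_contra hcon
      have hpa' : p a = true := by simpa using hcon
      have h2 : t.dropWhile p = (u ++ w).dropWhile p := by
        rw [← hw]; simp [hpa']
      rw [hh, ← hw] at h2
      have hlen := congrArg List.length h2
      have hle := List.length_dropWhile_le p (u ++ w)
      simp at hlen hle
      omega
    simp [hpa]

theorem chars_strip_idem (s : List Char) :
    PySem.Chars.strip (PySem.Chars.strip s) = PySem.Chars.strip s := by
  simp only [PySem.Chars.strip, PySem.Chars.lstrip, PySem.Chars.rstrip]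
  set p := PySem.Chars.isspace
  have hidem : (s.dropWhile p).dropWhile p = s.dropWhile p := List.dropWhile_idempotent p s
  set t := s.dropWhile p with ht
  rw [dropWhile_reverse_dropWhile_reverse_of_head p t hidem]
  rw [List.reverse_reverse, List.dropWhile_idempotent]

theorem str_strip_idem (s : String) :
    PySem.Str.strip (PySem.Str.strip s) = PySem.Str.strip s := by
  apply String.toList_inj.mp
  simp [PySem.Str.strip]
  exact chars_strip_idem s.toList

theorem P_not_Q (l : String) (h : eiaIsIntentions l = true) : eiaIsReasons l = false := by
  simp only [eiaIsIntentions, eiaIsReasons, PySem.Str.startswith_eq] at *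
  rw [PySem.Chars.startswith_iff] at h
  obtain ⟨t, ht⟩ := h
  apply Bool.not_eq_true _ |>.mp
  rw [PySem.Chars.startswith_iff]
  intro ⟨u, hu⟩
  rw [← ht] at hu
  have h1 : "Reasons_intentions:".toList = 'R' :: "easons_intentions:".toList := by decide
  have h2 : "Intentions:".toList = 'I' :: "ntentions:".toList := by decide
  rw [h1, h2] at hu
  simp at hu

theorem eiaStep_eq (st : List String × List String × Bool) (l : String)
    (hl : PySem.Str.strip l = l) :
    eiaStep st l =
      (if eiaIsIntentions l then (eiaIntentionsOf l, st.2.1, st.2.2)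
       else if eiaIsReasons l then (st.1, st.2.1, true)
       else if st.2.2 && (l != "") then (st.1, st.2.1 ++ [l], st.2.2)
       else st) := by
  simp only [eiaStep, eiaIsIntentions, eiaIsReasons, eiaIntentionsOf, hl]
  rfl

theorem eiaStep_strip (st : List String × List String × Bool) (l : String) :
    eiaStep st (PySem.Str.strip l) = eiaStep st l := by
  simp only [eiaStep, str_strip_idem]

theorem eia_main (ls : List String) (hs : ∀ l ∈ ls, PySem.Str.strip l = l)
    (i0 r0 : List String) (f0 : Bool) :
    ls.foldl eiaStep (i0, r0, f0) =
      ((match ls.reverse.find? eiaIsIntentions with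
        | some ln => eiaIntentionsOf ln
        | none => i0),
       r0 ++ (if f0 then ls.filter eiaKeep
              else match ls.findIdx? eiaIsReasons with
                | some i => (ls.drop (i + 1)).filter eiaKeep
                | none => []),
       (f0 || ls.any eiaIsReasons)) := by
  induction ls generalizing i0 r0 f0 with
  | nil => simp
  | cons l ls ih =>
    have hl : PySem.Str.strip l = l := hs l (by simp)
    have hs' : ∀ x ∈ ls, PySem.Str.strip x = x := fun x hx => hs x (by simp [hx])
    rw [List.foldl_cons, eiaStep_eq _ _ hl]
    by_cases hP : eiaIsIntentions l = true
    · have hQ : eiaIsReasons l = false := P_not_Q l hP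
      have hkeep : eiaKeep l = false := by simp [eiaKeep, hP]
      rw [if_pos hP, ih hs']
      simp only [Prod.mk.injEq]
      refine ⟨?_, ?_, ?_⟩
      · rw [List.reverse_cons, List.find?_append]
        cases hfind : ls.reverse.find? eiaIsIntentions <;> simp [hP]
      · cases f0
        · simp only [Bool.false_eq_true, if_false, List.findIdx?_cons, hQ]
          cases hidx : ls.findIdx? eiaIsReasons <;> simp
        · simp [hkeep]
      · simp [List.any_cons, hQ]
    · have hP' : eiaIsIntentions l = false := by simpa using hP
      rw [if_neg hP]
      by_cases hQ : eiaIsReasons l = true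
      · have hkeep : eiaKeep l = false := by simp [eiaKeep, hQ]
        rw [if_pos hQ, ih hs']
        simp only [Prod.mk.injEq]
        refine ⟨?_, ?_, ?_⟩
        · rw [List.reverse_cons, List.find?_append]
          cases hfind : ls.reverse.find? eiaIsIntentions <;> simp [hP']
        · cases f0
          · simp only [Bool.false_eq_true, if_false, if_true, List.findIdx?_cons, hQ]
            simp
          · simp [hkeep]
        · simp [List.any_cons, hQ]
      · have hQ' : eiaIsReasons l = false := by simpa using hQ
        rw [if_neg hQ]
        by_cases hE : l = ""
        · have hkeep : eiaKeep l = false := by simp [eiaKeep, hE]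
          rw [if_neg (by simp [hE] : ¬ ((f0 && (l != "")) = true)), ih hs']
          simp only [Prod.mk.injEq]
          refine ⟨?_, ?_, ?_⟩
          · rw [List.reverse_cons, List.find?_append]
            cases hfind : ls.reverse.find? eiaIsIntentions <;> simp [hP']
          · cases f0
            · simp only [Bool.false_eq_true, if_false, List.findIdx?_cons, hQ']
              cases hidx : ls.findIdx? eiaIsReasons <;> simp
            · simp [hkeep]
          · simp [List.any_cons, hQ']
        · have hkeep : eiaKeep l = true := by simp [eiaKeep, hE, hP', hQ']
          cases f0
          · rw [if_neg (by simp : ¬ ((false && (l != "")) = true)), ih hs']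
            simp only [Prod.mk.injEq]
            refine ⟨?_, ?_, ?_⟩
            · rw [List.reverse_cons, List.find?_append]
              cases hfind : ls.reverse.find? eiaIsIntentions <;> simp [hP']
            · simp only [Bool.false_eq_true, if_false, List.findIdx?_cons, hQ']
              cases hidx : ls.findIdx? eiaIsReasons <;> simp
            · simp [List.any_cons, hQ']
          · rw [if_pos (by simp [hE] : ((true && (l != "")) = true)), ih hs']
            simp only [Prod.mk.injEq]
            refine ⟨?_, ?_, ?_⟩
            · rw [List.reverse_cons, List.find?_append]
              cases hfind : ls.reverse.find? eiaIsIntentions <;> simp [hP']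
            · simp [hkeep]
            · simp [List.any_cons, hQ']

-- ===== VERDICT (by name: the statement is the Claim_ definition above) =====
theorem extract_intention_approval_spec : Claim_equal_extract_intention_approval := by
  intro text _
  unfold Spec_extract_intention_approval extract_intention_approval extract_intention_approval_alt
  set lines0 := (PySem.Str.split? text "\n").getD [] with hlines0
  have hs : ∀ l ∈ lines0.map PySem.Str.strip, PySem.Str.strip l = l := by
    intro l hl
    obtain ⟨x, -, rfl⟩ := List.mem_map.1 hl
    exact str_strip_idem x
  have hfold : lines0.foldl eiaStep ([], [], false) =
      (lines0.map PySem.Str.strip).foldl eiaStep ([], [], false) := by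
    rw [List.foldl_map]
    simp only [eiaStep_strip]
  have hmain := eia_main (lines0.map PySem.Str.strip) hs [] [] false
  show ((lines0.foldl eiaStep ([], [], false)).1,
        (lines0.foldl eiaStep ([], [], false)).2.1) = _
  rw [hfold, hmain]
  simp
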